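-- pv_equiv track=rewrite | github.com/nathanieljwise/PersonalProjects | misc/scale_calculator.py | natural_minor_scale
-- ===== SOURCE A (Python) =====
-- MUSICAL_NOTES = ['C', 'D\u266d', 'D', 'E\u266d', 'E', 'F', 'G\u266d', 'G', 'A\u266d', 'A', 'B\u266d', 'B']
--
-- NATURAL_MINOR_SCALE =  [2, 1, 2, 2, 1, 2, 2]
--
-- def natural_minor_scale(first_note):
--     musical_notes = MUSICAL_NOTES * 2  # Elongate scale to avoid range errors
--     user_note_list = [musical_notes[first_note]]  # Start list to keep notes in scale
--     next_note = first_note  # Rename to avoid confusion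
--     for i in range(0, len(NATURAL_MINOR_SCALE)):
--         user_note_list = user_note_list + [musical_notes[next_note + NATURAL_MINOR_SCALE[i]]]  # Put next note in list
--         next_note = next_note + int(NATURAL_MINOR_SCALE[i])  # Interval dictated by natural minor scale sequence
--     return user_note_list
-- ===== SOURCE B (Python) =====
-- MUSICAL_NOTES = ['C', 'D\u266d', 'D', 'E\u266d', 'E', 'F', 'G\u266d', 'G', 'A\u266d', 'A', 'B\u266d', 'B']
--
-- NATURAL_MINOR_SCALE = [2, 1, 2, 2, 1, 2, 2]
--
-- # cumulative semitone offsets of the natural minor scale (prefix sums of the intervals, starting at 0)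
-- SCALE_POSITIONS = [0, 2, 3, 5, 7, 8, 10, 12]
--
-- def natural_minor_scale(first_note):
--     musical_notes = MUSICAL_NOTES * 2  # doubled to allow indices past the octave
--     return [musical_notes[first_note + off] for off in SCALE_POSITIONS]
-- ===== Notes on version B (the rewrite author's own statement) =====
-- stated objective: simpler
-- what changed: Replaces the running-accumulator loop that repeatedly concatenates one-element lists with a precomputed table of cumulative offsets and a single mapping pass over it.
import Mathlib
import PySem

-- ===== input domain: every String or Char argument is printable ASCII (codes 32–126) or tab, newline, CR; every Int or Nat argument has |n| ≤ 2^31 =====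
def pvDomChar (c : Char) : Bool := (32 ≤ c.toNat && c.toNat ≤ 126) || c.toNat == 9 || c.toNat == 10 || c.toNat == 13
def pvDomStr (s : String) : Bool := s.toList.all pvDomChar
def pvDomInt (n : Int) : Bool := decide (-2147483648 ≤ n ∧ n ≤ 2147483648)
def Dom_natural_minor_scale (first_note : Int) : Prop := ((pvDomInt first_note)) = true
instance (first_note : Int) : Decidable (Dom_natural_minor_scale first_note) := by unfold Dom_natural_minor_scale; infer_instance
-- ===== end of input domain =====

-- B replaces A's running-accumulator concatenation loop by a literal table of cumulative
-- offsets and one mapping pass (objective: simpler).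

def pvMusicalNotes : List String :=
  ["C", "D♭", "D", "E♭", "E", "F", "G♭", "G", "A♭", "A", "B♭", "B"]

def pvNaturalMinorSteps : List Int := [2, 1, 2, 2, 1, 2, 2]

-- ===== PORT A =====
def natural_minor_scale (first_note : Int) : List String :=
  let musical_notes := pvMusicalNotes ++ pvMusicalNotes
  let user_note_list := [(PySem.List.pyGet? musical_notes first_note).getD ""]
  -- for-loop over the interval list, carrying (user_note_list, next_note)
  (pvNaturalMinorSteps.foldl
    (fun (st : List String × Int) iv =>
      (st.1 ++ [(PySem.List.pyGet? musical_notes (st.2 + iv)).getD ""], st.2 + iv))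
    (user_note_list, first_note)).1

-- ===== PORT B =====
def pvScalePositions : List Int := [0, 2, 3, 5, 7, 8, 10, 12]

def natural_minor_scale_alt (first_note : Int) : List String :=
  let musical_notes := pvMusicalNotes ++ pvMusicalNotes
  pvScalePositions.map (fun off => (PySem.List.pyGet? musical_notes (first_note + off)).getD "")

-- ===== PRECONDITION & SPEC =====
-- Pre_: exactly the inputs on which the Python A returns without IndexError: every accessed
-- index (first_note plus a cumulative scale offset) is in Python range for the doubled note list.
def Pre_natural_minor_scale (first_note : Int) : Prop :=
  -24 ≤ first_note ∧ first_note ≤ 11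
instance (first_note : Int) : Decidable (Pre_natural_minor_scale first_note) := by
  unfold Pre_natural_minor_scale; infer_instance

def pvWitness_natural_minor_scale : Int := (0)

def Spec_natural_minor_scale (first_note : Int) (out : List String) : Prop := out = natural_minor_scale_alt first_note
instance (first_note : Int) (out : List String) : Decidable (Spec_natural_minor_scale first_note out) := by unfold Spec_natural_minor_scale; infer_instance

-- ===== CLAIM (what is proved, stated in full; the proofs are below) =====
def Claim_equal_natural_minor_scale : Prop := ∀ (first_note : Int), Dom_natural_minor_scale first_note → Pre_natural_minor_scale first_note → Spec_natural_minor_scale first_note (natural_minor_scale first_note)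

-- ===== LEMMAS AND PROOFS =====

-- ===== VERDICT (by name: the statement is the Claim_ definition above) =====
theorem natural_minor_scale_spec : Claim_equal_natural_minor_scale := by
  intro n _ hpre
  unfold Spec_natural_minor_scale
  obtain ⟨h1, h2⟩ := hpre
  interval_cases n <;> decide
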